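-- pv_equiv track=rewrite | github.com/WinotoHasyim/realtime-asr-whisper | Part2/part2.py | process_prompt
-- ===== SOURCE A (Python) =====
-- def process_prompt(text, max_words=50):
--     """
--     Processes text for the prompt by removing consecutive duplicates
--     and limiting the total word count to the most recent words.
--     """
--     # 1. Remove consecutive repeated words
--     words = text.split()
--     if not words:
--         return ""
--
--     result_words = [words[0]]
--     for i in range(1, len(words)):
--         if words[i] != words[i-1]:
--             result_words.append(words[i])
--
--     # 2. Limit the total word count (taking the most recent words)
--     if len(result_words) > max_words:
--         result_words = result_words[-max_words:]
--
--     return " ".join(result_words)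
-- ===== SOURCE B (Python) =====
-- def process_prompt(text, max_words=50):
--     """
--     Processes text for the prompt by removing consecutive duplicates
--     and limiting the total word count to the most recent words.
--     """
--     # Scan the words right-to-left, keeping one representative per run of
--     # consecutive equal words, and stop as soon as max_words are collected;
--     # then reverse.  No dedup of the full text and no tail slice is needed.
--     words = text.split()
--     out = []
--     prev = None
--     for w in reversed(words):
--         if w != prev:
--             out.append(w)
--             if len(out) == max_words:
--                 break
--             prev = w
--     out.reverse()
--     return " ".join(out)
-- ===== Notes on version B (the rewrite author's own statement) =====
-- stated objective: alternative
-- what changed: Instead of A's forward index loop that dedups the whole text and then tail-slices, B scans the words right-to-left keeping one representative per run and stops early once max_words words are collected, so no slicing phase exists; Pre_ restricts to the natural domain max_words >= 0 (on negative counts A's slice result_words[-max_words:] drops words from the FRONT, a quirk B's algorithm never reproduces).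
-- outside the precondition, e.g. on process_prompt('a b c', -1): A returns 'b c', B returns 'a b c'
import Mathlib
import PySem

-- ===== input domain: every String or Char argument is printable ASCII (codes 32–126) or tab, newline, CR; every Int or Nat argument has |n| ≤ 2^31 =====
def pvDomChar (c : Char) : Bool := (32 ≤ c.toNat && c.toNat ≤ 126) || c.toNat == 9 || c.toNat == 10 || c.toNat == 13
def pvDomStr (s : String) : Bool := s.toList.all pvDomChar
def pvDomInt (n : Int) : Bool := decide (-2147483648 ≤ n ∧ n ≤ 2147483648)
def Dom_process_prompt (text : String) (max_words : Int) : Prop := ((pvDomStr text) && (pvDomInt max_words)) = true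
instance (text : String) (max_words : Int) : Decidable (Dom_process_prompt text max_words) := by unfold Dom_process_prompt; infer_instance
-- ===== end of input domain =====

-- B scans the words right-to-left keeping one representative per run of equal words and stops
-- early once max_words are collected (no dedup of the full text, no tail slice); same values on
-- the natural domain max_words ≥ 0.

-- ===== PORT A =====
def process_prompt (text : String) (max_words : Int) : String :=
  let words := PySem.Str.split₀ text
  if words = [] then ""
  else
    let result_words :=
      (PySem.List.pyRange 1 (PySem.List.len words) 1).foldl
        (fun acc i =>
          if PySem.List.pyGetD words i "" ≠ PySem.List.pyGetD words (i - 1) "" then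
            acc ++ [PySem.List.pyGetD words i ""]
          else acc)
        [PySem.List.pyGetD words 0 ""]
    let result_words :=
      if PySem.List.len result_words > max_words then
        PySem.List.slice result_words (some (-max_words)) none
      else result_words
    PySem.Str.join " " result_words

-- ===== PORT B =====
-- the for-loop over reversed(words): out/prev are the loop state, the 'break' is the early return
def collectRev (m : Int) : List String → Option String → List String → List String
  | [], _, out => out
  | w :: rest, prev, out =>
    if some w ≠ prev then
      let out' := out ++ [w]
      if PySem.List.len out' = m then out'
      else collectRev m rest (some w) out'
    else collectRev m rest prev out

def process_prompt_alt (text : String) (max_words : Int) : String :=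
  let out := collectRev max_words (PySem.Str.split₀ text).reverse none []
  PySem.Str.join " " out.reverse

-- ===== PRECONDITION & SPEC =====
-- Pre_ restricts to the natural domain of a word-count limit, max_words ≥ 0: on negative counts
-- A's slice result_words[-max_words:] becomes a positive-index slice that drops words from the
-- FRONT, a quirk of the slice expression that B's algorithm never reproduces.
def Pre_process_prompt (text : String) (max_words : Int) : Prop := 0 ≤ max_words
instance (text : String) (max_words : Int) : Decidable (Pre_process_prompt text max_words) := by unfold Pre_process_prompt; infer_instance
def pvWitness_process_prompt : String × Int := ("the the quick fox fox", 3)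

def Spec_process_prompt (text : String) (max_words : Int) (out : String) : Prop := out = process_prompt_alt text max_words
instance (text : String) (max_words : Int) (out : String) : Decidable (Spec_process_prompt text max_words out) := by unfold Spec_process_prompt; infer_instance

-- ===== CLAIM (what is proved, stated in full; the proofs are below) =====
def Claim_equal_process_prompt : Prop := ∀ (text : String) (max_words : Int), Dom_process_prompt text max_words → Pre_process_prompt text max_words → Spec_process_prompt text max_words (process_prompt text max_words)

-- ===== LEMMAS AND PROOFS =====

-- keys of the runs of consecutive equal words (the value A's loop builds)
def groupKeys : List String → List String
  | [] => []
  | x :: xs => x :: groupKeys (xs.dropWhile (fun w => w == x))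
termination_by l => l.length
decreasing_by
  simp only [List.length_cons]
  exact Nat.lt_succ_of_le (List.length_dropWhile_le _ _)

-- suffix form of A's loop body: contribution of indices k+1 .. n-1
def tailDedup : List String → List String
  | [] => []
  | [_] => []
  | a :: b :: t => (if b ≠ a then [b] else []) ++ tailDedup (b :: t)

lemma groupKeys_eq_cons_tailDedup : ∀ (ys : List String) (x : String),
    groupKeys (x :: ys) = x :: tailDedup (x :: ys) := by
  intro ys
  induction ys with
  | nil => intro x; simp [groupKeys, tailDedup]
  | cons y t ih =>
    intro x
    rw [groupKeys]
    simp only [List.dropWhile_cons]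
    by_cases h : y = x
    · subst h
      simp only [BEq.rfl, if_pos]
      have h2 := ih y
      rw [groupKeys] at h2
      rw [h2]
      simp [tailDedup]
    · have hb : (y == x) = false := by simp [h]
      rw [hb]
      simp only [Bool.false_eq_true, if_false]
      rw [ih y]
      simp [tailDedup, h]

lemma foldlA_suffix (words : List String) : ∀ (k : Nat) (acc : List String),
    (PySem.List.pyRange ((k : Int) + 1) (PySem.List.len words) 1).foldl
        (fun acc i =>
          if PySem.List.pyGetD words i "" ≠ PySem.List.pyGetD words (i - 1) "" then
            acc ++ [PySem.List.pyGetD words i ""]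
          else acc)
        acc
      = acc ++ tailDedup (words.drop k) := by
  intro k
  induction hn : words.length - (k + 1) generalizing k with
  | zero =>
    intro acc
    have hk : words.length ≤ k + 1 := by omega
    rw [PySem.List.pyRange_one_eq_nil (by simp only [PySem.List.len_eq]; omega)]
    have : (words.drop k).length ≤ 1 := by simp; omega
    interval_cases h : (words.drop k).length
    · simp [List.length_eq_zero_iff.mp h, tailDedup]
    · obtain ⟨a, ha⟩ := List.length_eq_one_iff.mp h
      simp [ha, tailDedup]
  | succ m ih =>
    intro acc
    have hk1 : k + 1 < words.length := by omega
    rw [PySem.List.pyRange_one_cons (by simp only [PySem.List.len_eq]; omega)]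
    simp only [List.foldl_cons]
    have hget1 : PySem.List.pyGetD words ((k : Int) + 1) "" = words[k + 1] := by
      have := PySem.List.pyGetD_natCast (xs := words) (n := k + 1) (d := "")
      push_cast at this
      rw [this, List.getD_eq_getElem _ _ hk1]
    have hget0 : PySem.List.pyGetD words ((k : Int) + 1 - 1) "" = words[k]'(by omega) := by
      have : (k : Int) + 1 - 1 = (k : Int) := by ring
      rw [this, PySem.List.pyGetD_natCast, List.getD_eq_getElem _ _ (by omega)]
    have hdrop1 : words.drop (k + 1) = words[k + 1] :: words.drop (k + 2) :=
      List.drop_eq_getElem_cons hk1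
    have htd : tailDedup (words.drop k)
        = (if words[k + 1] ≠ words[k]'(by omega) then [words[k + 1]] else [])
          ++ tailDedup (words.drop (k + 1)) := by
      rw [List.drop_eq_getElem_cons (show k < words.length by omega), hdrop1]
      simp only [tailDedup]
    have harg : ((k : Int) + 1) + 1 = ((k + 1 : Nat) : Int) + 1 := by push_cast; ring
    rw [harg, ih (k + 1) (by omega), hget1, hget0, htd]
    by_cases hne : words[k + 1] = words[k]'(by omega)
    · simp [hne]
    · simp [hne]

lemma dedup_lists_eq (words : List String) (h : words ≠ []) :
    (PySem.List.pyRange 1 (PySem.List.len words) 1).foldl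
        (fun acc i =>
          if PySem.List.pyGetD words i "" ≠ PySem.List.pyGetD words (i - 1) "" then
            acc ++ [PySem.List.pyGetD words i ""]
          else acc)
        [PySem.List.pyGetD words 0 ""]
      = groupKeys words := by
  obtain ⟨x, ys, rfl⟩ := List.exists_cons_of_ne_nil h
  have h0 : PySem.List.pyGetD (x :: ys) 0 "" = x := PySem.List.pyGetD_zero_cons x ys ""
  have := foldlA_suffix (x :: ys) 0 [x]
  simp only [Nat.cast_zero, zero_add, List.drop_zero] at this
  rw [h0, this, groupKeys_eq_cons_tailDedup]
  simp

-- prev-based dedup (the loop state of B, without the counter)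
def gkP : List String → Option String → List String
  | [], _ => []
  | w :: rest, prev => if some w ≠ prev then w :: gkP rest (some w) else gkP rest prev

lemma gkP_some : ∀ (l : List String) (w : String),
    gkP l (some w) = groupKeys (l.dropWhile (fun x => x == w)) := by
  intro l
  induction l with
  | nil => intro w; simp [gkP, groupKeys]
  | cons a t ih =>
    intro w
    by_cases h : a = w
    · subst h
      simp [gkP, ih]
    · have hb : (a == w) = false := by simp [h]
      simp only [gkP, List.dropWhile_cons, hb]
      simp only [Bool.false_eq_true, if_false]
      rw [groupKeys, ih a]
      simp [h]

lemma gkP_none (l : List String) : gkP l none = groupKeys l := by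
  cases l with
  | nil => simp [gkP, groupKeys]
  | cons a t => rw [gkP, groupKeys]; simp [gkP_some]

lemma getLast?_dropWhile {l : List String} {p : String → Bool}
    (h : l.dropWhile p ≠ []) : (l.dropWhile p).getLast? = l.getLast? := by
  obtain ⟨pre, hpre⟩ := List.dropWhile_suffix (l := l) p
  conv_rhs => rw [← hpre]
  exact Eq.symm (List.getLast?_append_of_ne_nil pre h)

lemma groupKeys_ne_nil {l : List String} (h : l ≠ []) : groupKeys l ≠ [] := by
  obtain ⟨x, t, rfl⟩ := List.exists_cons_of_ne_nil h
  rw [groupKeys]; simp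

lemma dropWhile_append_single (y x : String) (t : List String) :
    (t ++ [x]).dropWhile (fun w => w == y) =
      if t.dropWhile (fun w => w == y) = [] then (if x = y then [] else [x])
      else t.dropWhile (fun w => w == y) ++ [x] := by
  induction t with
  | nil => by_cases hxy : x = y <;> simp [hxy]
  | cons a t' ih =>
    by_cases hay : a = y
    · subst hay; simpa using ih
    · simp [hay]

lemma groupKeys_append_last (x : String) : ∀ (l : List String), l ≠ [] →
    groupKeys (l ++ [x]) =
      if l.getLast? = some x then groupKeys l else groupKeys l ++ [x] := by
  intro l
  induction hn : l.length using Nat.strong_induction_on generalizing l with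
  | _ n ih =>
    intro h
    obtain ⟨y, t, rfl⟩ := List.exists_cons_of_ne_nil h
    by_cases hd : t.dropWhile (fun w => w == y) = []
    · -- the whole of y :: t is one run of y's
      have hlast : (y :: t).getLast? = some y := by
        rcases List.eq_nil_or_concat t with rfl | ⟨t', a, rfl⟩
        · simp
        · have ha : a = y := by
            have := List.dropWhile_eq_nil_iff.mp hd a (by simp)
            simpa using this
          subst ha
          have h2 : a :: t'.concat a = (a :: t') ++ [a] := by simp
          rw [h2, List.getLast?_append_of_ne_nil _ (by simp)]
          rfl
      have hgk : groupKeys (y :: t) = [y] := by rw [groupKeys, hd]; simp [groupKeys]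
      rw [hlast]
      by_cases hxy : x = y
      · subst hxy
        rw [if_pos rfl, List.cons_append, groupKeys, dropWhile_append_single, if_pos hd,
          if_pos rfl, hgk]
        simp [groupKeys]
      · rw [if_neg (by simpa using fun hh : y = x => hxy hh.symm), List.cons_append,
          groupKeys, dropWhile_append_single, if_pos hd, if_neg hxy, hgk]
        simp [groupKeys]
    · -- the tail after the first run is nonempty
      have htne : t ≠ [] := by intro ht; rw [ht] at hd; simp at hd
      have hlast : (y :: t).getLast? = (t.dropWhile (fun w => w == y)).getLast? := by
        rw [getLast?_dropWhile hd]
        obtain ⟨b, t', rfl⟩ := List.exists_cons_of_ne_nil htne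
        exact List.getLast?_cons_cons ..
      have hlen : (t.dropWhile (fun w => w == y)).length < n := by
        have h1 := List.length_dropWhile_le (fun w => w == y) t
        simp only [← hn, List.length_cons]; omega
      rw [List.cons_append, groupKeys, dropWhile_append_single, if_neg hd,
        ih _ hlen _ rfl hd, hlast]
      conv_rhs => rw [groupKeys]
      by_cases hcase : (t.dropWhile (fun w => w == y)).getLast? = some x
      · rw [if_pos hcase, if_pos hcase]
      · rw [if_neg hcase, if_neg hcase]; simp

lemma groupKeys_reverse : ∀ (l : List String),
    groupKeys l.reverse = (groupKeys l).reverse := by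
  intro l
  induction l with
  | nil => simp [groupKeys]
  | cons a t ih =>
    cases t with
    | nil => simp [groupKeys]
    | cons b t' =>
      have hne : (b :: t').reverse ≠ [] := by simp
      have hlastrev : ((b :: t').reverse).getLast? = some b := by
        rw [List.getLast?_reverse]; simp
      have hsplit : (a :: b :: t').reverse = (b :: t').reverse ++ [a] := by simp
      rw [hsplit, groupKeys_append_last a _ hne, hlastrev, ih]
      by_cases hba : b = a
      · subst hba
        rw [if_pos rfl]
        congr 1
        conv_rhs => rw [groupKeys]
        conv_lhs => rw [groupKeys]
        simp
      · rw [if_neg (by simp [hba])]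
        conv_rhs => rw [groupKeys]
        have hb : (b == a) = false := by simp [hba]
        simp only [List.dropWhile_cons, hb, Bool.false_eq_true, if_false]
        simp [groupKeys]

-- B's loop when max_words ≤ 0: the break never fires, all run keys are collected
lemma collectRev_nonpos (m : Int) (hm : m ≤ 0) : ∀ (l : List String) (prev : Option String)
    (out : List String), collectRev m l prev out = out ++ gkP l prev := by
  intro l
  induction l with
  | nil => intro prev out; simp [collectRev, gkP]
  | cons w rest ih =>
    intro prev out
    rw [collectRev, gkP]
    by_cases h : some w ≠ prev
    · rw [if_pos h, if_pos h]
      have hlen : PySem.List.len (out ++ [w]) ≠ m := by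
        simp only [PySem.List.len_eq, List.length_append, List.length_singleton]
        omega
      rw [if_neg hlen, ih]
      simp
    · rw [if_neg h, if_neg h, ih]

-- B's loop when max_words ≥ 1: it collects the first (max_words - |out|) remaining run keys
lemma collectRev_pos (m' : Nat) : ∀ (l : List String) (prev : Option String)
    (out : List String), out.length < m' →
    collectRev (m' : Int) l prev out = out ++ (gkP l prev).take (m' - out.length) := by
  intro l
  induction l with
  | nil => intro prev out _; simp [collectRev, gkP]
  | cons w rest ih =>
    intro prev out hout
    rw [collectRev, gkP]
    by_cases h : some w ≠ prev
    · rw [if_pos h, if_pos h]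
      by_cases hstop : PySem.List.len (out ++ [w]) = (m' : Int)
      · rw [if_pos hstop]
        have : out.length + 1 = m' := by
          simp only [PySem.List.len_eq, List.length_append, List.length_singleton] at hstop
          omega
        have h1 : m' - out.length = 1 := by omega
        rw [h1]
        simp
      · rw [if_neg hstop]
        have hlt : out.length + 1 < m' := by
          simp only [PySem.List.len_eq, List.length_append, List.length_singleton] at hstop
          omega
        rw [ih (some w) (out ++ [w]) (by simpa using hlt)]
        have h2 : m' - out.length = (m' - (out ++ [w]).length) + 1 := by
          simp only [List.length_append, List.length_singleton]; omega
        rw [h2]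
        simp [List.take_succ_cons]
    · rw [if_neg h, if_neg h, ih prev out hout]

lemma join_congr (l1 l2 : List String) (h : l1 = l2) :
    PySem.Str.join " " l1 = PySem.Str.join " " l2 := by rw [h]

-- ===== VERDICT (by name: the statement is the Claim_ definition above) =====
theorem process_prompt_spec : Claim_equal_process_prompt := by
  intro text max_words _ hpre
  unfold Pre_process_prompt at hpre
  unfold Spec_process_prompt process_prompt process_prompt_alt
  by_cases hw : PySem.Str.split₀ text = []
  · rw [if_pos hw, hw]
    simp [collectRev, PySem.Str.join, PySem.Chars.join, List.intercalate]
  · rw [if_neg hw]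
    apply join_congr
    set words := PySem.Str.split₀ text with hwords
    rw [dedup_lists_eq words hw]
    set D := groupKeys words with hD
    have hDne : D ≠ [] := groupKeys_ne_nil hw
    have hDrev : gkP words.reverse none = D.reverse := by
      rw [gkP_none, groupKeys_reverse]
    by_cases h0 : max_words = 0
    · subst h0
      rw [collectRev_nonpos 0 le_rfl, hDrev]
      have hlen : PySem.List.len D > 0 := by
        simp only [PySem.List.len_eq]
        exact_mod_cast List.length_pos_of_ne_nil hDne
      rw [if_pos hlen]
      simp [PySem.List.slice_none_none]
    · have hpos : 0 < max_words := lt_of_le_of_ne hpre (Ne.symm h0)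
      obtain ⟨m', rfl⟩ : ∃ m' : Nat, max_words = (m' : Int) :=
        ⟨max_words.toNat, (Int.toNat_of_nonneg hpre).symm⟩
      have hm' : 0 < m' := by exact_mod_cast hpos
      rw [collectRev_pos m' words.reverse none [] (by simpa using hm'), hDrev]
      simp only [List.nil_append, List.length_nil, Nat.sub_zero]
      by_cases hbig : PySem.List.len D > (m' : Int)
      · rw [if_pos hbig]
        have hlt : m' < D.length := by
          simp only [PySem.List.len_eq] at hbig
          exact_mod_cast hbig
        rw [PySem.List.slice_from_neg_natCast D (k := m') hm']
        rw [List.take_reverse, List.reverse_reverse]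
      · rw [if_neg hbig]
        have hle : D.length ≤ m' := by
          simp only [PySem.List.len_eq] at hbig
          omega
        rw [List.take_of_length_le (by simpa using hle), List.reverse_reverse]
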